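-- pv_equiv track=rewrite | github.com/sohui2470/PythonWorkSpace | duplicate_num.py | DuplicateNum
-- ===== SOURCE A (Python) =====
-- def DuplicateNum(n):
--     x = []
--     for i in range(10):
--         x.append(str(i))
--     a = sorted(n)
--     if a == x:
--         return True
--     else:
--         return False
-- ===== SOURCE B (Python) =====
-- def DuplicateNum(n):
--     return len(n) == 10 and set(n) == {str(d) for d in range(10)}
-- ===== Notes on version B (the rewrite author's own statement) =====
-- stated objective: simpler
-- what changed: Replaces building the digit list, sorting the input and comparing lists with a length check plus a set-equality test against {'0'..'9'}, removing the sort entirely.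
import Mathlib
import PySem

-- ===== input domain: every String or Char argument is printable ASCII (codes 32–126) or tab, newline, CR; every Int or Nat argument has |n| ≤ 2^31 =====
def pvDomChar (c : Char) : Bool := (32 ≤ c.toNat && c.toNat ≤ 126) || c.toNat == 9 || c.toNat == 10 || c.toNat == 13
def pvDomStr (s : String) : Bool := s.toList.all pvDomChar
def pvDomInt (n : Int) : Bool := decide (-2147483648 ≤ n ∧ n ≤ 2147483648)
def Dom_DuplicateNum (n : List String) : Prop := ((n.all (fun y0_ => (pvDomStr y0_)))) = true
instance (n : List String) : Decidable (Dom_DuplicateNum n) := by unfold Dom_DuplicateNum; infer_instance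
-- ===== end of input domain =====

-- B replaces "build the digit list, sort the input, compare lists" by a length check plus a
-- set-equality test against {'0'..'9'}; no sort.

-- ===== PORT A =====
def DuplicateNum (n : List String) : Bool :=
  -- x = []; for i in range(10): x.append(str(i))
  let x : List String := (PySem.List.pyRange 0 10 1).foldl (fun acc i => acc ++ [PySem.Int.toStr i]) []
  -- a = sorted(n)
  let a := PySem.List.sorted n (fun s => s) false
  -- if a == x: return True else: return False
  if a = x then true else false

-- ===== PORT B =====
def DuplicateNum_alt (n : List String) : Bool :=
  -- len(n) == 10 and set(n) == {str(d) for d in range(10)}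
  decide (n.length = 10) &&
    PySem.Set.equal (PySem.Set.ofList n)
      ((PySem.List.pyRange 0 10 1).foldl (fun s d => PySem.Set.add s (PySem.Int.toStr d)) PySem.Set.empty)

-- ===== PRECONDITION & SPEC =====
def Spec_DuplicateNum (n : List String) (out : Bool) : Prop := out = DuplicateNum_alt n
instance (n : List String) (out : Bool) : Decidable (Spec_DuplicateNum n out) := by unfold Spec_DuplicateNum; infer_instance

-- ===== CLAIM (what is proved, stated in full; the proofs are below) =====
def Claim_equal_DuplicateNum : Prop := ∀ (n : List String), Dom_DuplicateNum n → Spec_DuplicateNum n (DuplicateNum n)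

-- ===== LEMMAS AND PROOFS =====

def pvDigits : List String := ["0","1","2","3","4","5","6","7","8","9"]

theorem pvDigits_nodup : pvDigits.Nodup := by decide

theorem pvDigits_pairwise : pvDigits.Pairwise (fun a b : String => (fun s => s) a < (fun s => s) b) := by
  simp only [String.lt_iff_toList_lt]; decide

-- A's built list is the digit literals
theorem A_x_eq : (PySem.List.pyRange 0 10 1).foldl (fun acc i => acc ++ [PySem.Int.toStr i]) ([] : List String) = pvDigits := by
  decide

-- B's built set is the digit literals
theorem B_set_eq : (PySem.List.pyRange 0 10 1).foldl (fun s d => PySem.Set.add s (PySem.Int.toStr d)) (PySem.Set.empty : PySem.Set String) = pvDigits := by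
  decide

theorem sorted_eq_digits_iff (n : List String) :
    PySem.List.sorted n (fun s => s) false = pvDigits ↔ n.Perm pvDigits := by
  constructor
  · intro h
    have hp : (PySem.List.sorted n (fun s => s) false).Perm n := PySem.List.sorted_perm n (fun s => s) false
    rw [h] at hp
    exact hp.symm
  · intro h
    exact PySem.List.sorted_eq_of_perm_of_pairwise_lt n pvDigits (fun s => s) h.symm pvDigits_pairwise

theorem perm_digits_iff (n : List String) :
    n.Perm pvDigits ↔ n.length = 10 ∧ ∀ x, x ∈ n ↔ x ∈ pvDigits := by
  constructor
  · intro h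
    exact ⟨h.length_eq, fun x => ⟨fun hx => h.mem_iff.mp hx, fun hx => h.mem_iff.mpr hx⟩⟩
  · rintro ⟨hlen, hmem⟩
    have hsub : List.Subperm pvDigits n := pvDigits_nodup.subperm (fun x hx => (hmem x).mpr hx)
    have hp : pvDigits.Perm n := hsub.perm_of_length_le (by simp [hlen, pvDigits])
    exact hp.symm

-- ===== VERDICT (by name: the statement is the Claim_ definition above) =====
theorem DuplicateNum_spec : Claim_equal_DuplicateNum := by
  intro n _
  unfold Spec_DuplicateNum DuplicateNum DuplicateNum_alt
  rw [A_x_eq, B_set_eq]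
  have key : (PySem.List.sorted n (fun s => s) false = pvDigits) ↔
      ((decide (n.length = 10) && PySem.Set.equal (PySem.Set.ofList n) pvDigits) = true) := by
    rw [sorted_eq_digits_iff, perm_digits_iff]
    simp only [Bool.and_eq_true, decide_eq_true_eq, PySem.Set.equal_iff]
    constructor
    · rintro ⟨h1, h2⟩
      exact ⟨h1, fun x => by rw [PySem.Set.mem_ofList]; exact h2 x⟩
    · rintro ⟨h1, h2⟩
      exact ⟨h1, fun x => by rw [← PySem.Set.mem_ofList (xs := n)]; exact h2 x⟩
  simp only []
  split_ifs with h
  · exact (key.mp h).symm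
  · cases hb : (decide (n.length = 10) && PySem.Set.equal (PySem.Set.ofList n) pvDigits)
    · rfl
    · exact absurd (key.mpr hb) h
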